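-- pv_equiv track=rewrite | github.com/prvnlhr/Python-DSA | Data Structure/450 DSA Questions/Strings/19. Make binary string alternate.py | minReplacement
-- ===== SOURCE A (Python) =====
-- def minReplacement(s, length):
--     ans = 0
--     for i in range(0, length):
--
--         # If there is 1 at even index positions
--         if i % 2 == 0 and s[i] == '1':
--             ans += 1
--
--         # If there is 0 at odd index positions
--         if i % 2 == 1 and s[i] == '0':
--             ans += 1
--
--     return min(ans, length - ans)
-- ===== SOURCE B (Python) =====
-- def minReplacement(s, length):
--     # Pair-stepping scan of the first max(0, length) characters: no per-index parity tests.
--     t = s[:max(0, length)]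
--     n = len(t)
--     ans = 0
--     k = 0
--     while k + 1 < n:
--         ans += (t[k] == '1') + (t[k + 1] == '0')
--         k += 2
--     if k < n:
--         ans += (t[k] == '1')
--     return min(ans, length - ans)
-- ===== Notes on version B (the rewrite author's own statement) =====
-- stated objective: alternative
-- what changed: Replaces the per-index loop with parity branches by slicing the first `length` characters and scanning them two at a time (one '1'-check and one '0'-check per pair, no modulo tests), then taking min(ans, length-ans) as before.
import Mathlib
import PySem

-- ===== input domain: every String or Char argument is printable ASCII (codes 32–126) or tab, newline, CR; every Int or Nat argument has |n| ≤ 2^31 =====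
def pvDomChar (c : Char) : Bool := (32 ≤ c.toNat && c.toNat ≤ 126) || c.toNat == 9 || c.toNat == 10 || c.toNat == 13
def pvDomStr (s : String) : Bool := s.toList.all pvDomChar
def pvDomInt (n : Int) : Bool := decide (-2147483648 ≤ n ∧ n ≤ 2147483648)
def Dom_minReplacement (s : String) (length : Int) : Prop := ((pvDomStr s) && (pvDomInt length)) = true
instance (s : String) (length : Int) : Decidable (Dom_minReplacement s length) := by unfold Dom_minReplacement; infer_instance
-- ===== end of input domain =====

-- B replaces the per-index loop with parity branches by a pair-stepping scan of the sliced prefix (alternative decomposition, same cost).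

-- ===== PORT A =====
def minReplacement (s : String) (length : Int) : Int :=
  let ans := (PySem.List.pyRange 0 length 1).foldl (fun ans i =>
    let ans := if PySem.Int.mod i 2 == 0 && PySem.List.pyGet? s.toList i == some '1' then ans + 1 else ans
    if PySem.Int.mod i 2 == 1 && PySem.List.pyGet? s.toList i == some '0' then ans + 1 else ans) 0
  min ans (length - ans)

-- ===== PORT B =====
-- the while loop of Source B: steps k by 2, returns (ans, k) at loop exit
def altLoop (t : List Char) (k : Nat) (ans : Int) : Int × Nat :=
  if h : k + 1 < t.length then
    altLoop t (k + 2)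
      (ans + (if t[k]'(by omega) == '1' then 1 else 0) + (if t[k + 1]'h == '0' then 1 else 0))
  else (ans, k)
termination_by t.length - k

-- the trailing "if k < n: ans += (t[k] == '1')" of Source B
def altFinish (t : List Char) (ans : Int) (k : Nat) : Int :=
  if h : k < t.length then ans + (if t[k]'h == '1' then 1 else 0) else ans

def minReplacement_alt (s : String) (length : Int) : Int :=
  let t := PySem.List.slice s.toList none (some (max 0 length))
  let p := altLoop t 0 0
  let ans := altFinish t p.1 p.2
  min ans (length - ans)

-- ===== PRECONDITION & SPEC =====
-- Pre_ excludes only length > len(s), on which A raises IndexError.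
def Pre_minReplacement (s : String) (length : Int) : Prop :=
  length ≤ (s.toList.length : Int)
instance (s : String) (length : Int) : Decidable (Pre_minReplacement s length) := by
  unfold Pre_minReplacement; infer_instance

def pvWitness_minReplacement : String × Int := ("0101", 4)

def Spec_minReplacement (s : String) (length : Int) (out : Int) : Prop := out = minReplacement_alt s length
instance (s : String) (length : Int) (out : Int) : Decidable (Spec_minReplacement s length out) := by unfold Spec_minReplacement; infer_instance

-- ===== CLAIM (what is proved, stated in full; the proofs are below) =====
def Claim_equal_minReplacement : Prop := ∀ (s : String) (length : Int), Dom_minReplacement s length → Pre_minReplacement s length → Spec_minReplacement s length (minReplacement s length)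

-- ===== LEMMAS AND PROOFS =====

-- proof-only helper: replacements needed for the '0101…' pattern, two characters at a time
def pairSum : List Char → Int
  | [] => 0
  | [a] => (if a == '1' then 1 else 0)
  | a :: b :: r => (if a == '1' then 1 else 0) + (if b == '0' then 1 else 0) + pairSum r

-- proof-only helper: the same count with an explicit parity flag (true = even position)
def go2 : Bool → List Char → Int
  | _, [] => 0
  | true, a :: r => (if a == '1' then 1 else 0) + go2 false r
  | false, b :: r => (if b == '0' then 1 else 0) + go2 true r

theorem pairSum_eq_go2 (l : List Char) : pairSum l = go2 true l := by
  induction l using pairSum.induct <;> simp [pairSum, go2, *] <;> ring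

theorem altLoop_finish (t : List Char) (k : Nat) (ans : Int) :
    altFinish t (altLoop t k ans).1 (altLoop t k ans).2 = ans + pairSum (t.drop k) := by
  induction k, ans using altLoop.induct t with
  | case1 k ans h ih =>
    simp only [dite_eq_ite] at ih
    rw [altLoop, dif_pos h, ih]
    rw [List.drop_eq_getElem_cons (by omega : k < t.length),
        List.drop_eq_getElem_cons (by omega : k + 1 < t.length)]
    simp [pairSum]; ring
  | case2 k ans h =>
    rw [altLoop, dif_neg h]
    by_cases hk : k < t.length
    · rw [List.drop_eq_getElem_cons hk, List.drop_eq_nil_of_le (by omega)]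
      simp [altFinish, hk, pairSum]
    · rw [List.drop_eq_nil_of_le (by omega)]
      simp [altFinish, hk, pairSum]

theorem aLoop_spec (cs : List Char) (n : Nat) (hn : n ≤ cs.length) :
    ∀ (fuel a : Nat) (acc : Int), a + fuel = n →
    (PySem.List.pyRange (a : Int) (n : Int) 1).foldl (fun ans i =>
        let ans := if PySem.Int.mod i 2 == 0 && PySem.List.pyGet? cs i == some '1' then ans + 1 else ans
        if PySem.Int.mod i 2 == 1 && PySem.List.pyGet? cs i == some '0' then ans + 1 else ans) acc
      = acc + go2 (decide (a % 2 = 0)) ((cs.take n).drop a) := by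
  intro fuel
  induction fuel with
  | zero =>
    intro a acc ha
    have : a = n := by omega
    subst this
    rw [PySem.List.pyRange_one_eq_nil (le_refl _),
        List.drop_eq_nil_of_le (by simp only [List.length_take]; omega)]
    simp [go2]
  | succ m ih =>
    intro a acc ha
    have han : a < n := by omega
    have hal : a < cs.length := by omega
    rw [PySem.List.pyRange_one_cons (by exact_mod_cast han)]
    have hcast : (a : Int) + 1 = ((a + 1 : Nat) : Int) := by push_cast; ring
    rw [List.foldl_cons, hcast, ih (a + 1) _ (by omega)]
    have hget : PySem.List.pyGet? cs (a : Int) = some (cs[a]'hal) := by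
      simp [PySem.List.pyGet?_natCast, List.getElem?_eq_getElem hal]
    have hmod : PySem.Int.mod (a : Int) 2 = ((a % 2 : Nat) : Int) :=
      PySem.Int.mod_natCast a 2
    have hdrop : (cs.take n).drop a = (cs[a]'hal) :: (cs.take n).drop (a + 1) := by
      rw [List.drop_eq_getElem_cons (by simp only [List.length_take]; omega)]
      congr 1
      simp [List.getElem_take]
    rw [hdrop]
    rcases Nat.mod_two_eq_zero_or_one a with he | ho
    · have ho1 : (a + 1) % 2 = 1 := by omega
      simp only [hget, hmod, he, ho1]
      norm_num
      split_ifs with hc <;> simp [go2, hc] <;> ring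
    · have he1 : (a + 1) % 2 = 0 := by omega
      simp only [hget, hmod, ho, he1]
      norm_num
      split_ifs with hc <;> simp [go2, hc] <;> ring

-- ===== VERDICT (by name: the statement is the Claim_ definition above) =====
theorem minReplacement_spec : Claim_equal_minReplacement := by
  intro s length _dom hpre
  replace hpre : length ≤ (s.toList.length : Int) := hpre
  unfold Spec_minReplacement minReplacement minReplacement_alt
  rcases (by omega : 0 ≤ length ∨ length < 0) with h0 | hneg
  · have hmax : max 0 length = length := max_eq_right h0
    have hn : length = ((length.toNat : Nat) : Int) := (Int.toNat_of_nonneg h0).symm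
    set n := length.toNat with hndef
    have hnl : n ≤ s.toList.length := by omega
    have hA := aLoop_spec s.toList n hnl n 0 0 (by omega)
    simp only [Nat.cast_zero, Nat.zero_mod, decide_true, List.drop_zero, zero_add] at hA
    have hslice : PySem.List.slice s.toList none (some (max 0 length)) = s.toList.take n := by
      rw [hmax, hn]; exact PySem.List.slice_to_natCast s.toList n
    rw [hn] at hslice
    have hB := altLoop_finish (s.toList.take n) 0 0
    simp only [List.drop_zero] at hB
    rw [hn]
    simp only [hA, hslice, hB, pairSum_eq_go2, zero_add]
  · have hmax : max 0 length = 0 := max_eq_left (le_of_lt hneg)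
    have hslice : PySem.List.slice s.toList none (some (max 0 length)) = [] := by
      rw [hmax]
      have h := PySem.List.slice_to_natCast s.toList 0
      simpa using h
    have hB := altLoop_finish ([] : List Char) 0 0
    simp only [List.drop_zero] at hB
    rw [PySem.List.pyRange_one_eq_nil (le_of_lt hneg)]
    simp only [List.foldl_nil, hslice, hB, pairSum, zero_add]
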